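-- pv_equiv track=rewrite | github.com/bloomberg/fun2spec | fun2spec/llm_generator/prompt_builder.py | extract_error_lines
-- ===== SOURCE A (Python) =====
-- def extract_error_lines(text, max_lines=10):
--     # Split the text into lines
--     all_lines = text.splitlines()
--
--     # If the entire text has fewer than 10 lines, return all lines
--     if len(all_lines) <= max_lines:
--         return text
--
--     # Otherwise, extract lines containing "error" (case-insensitive)
--     error_lines = [line for line in all_lines if "error" in line.lower()]
--
--     # If there are more than max_lines error lines, return only the bottom max_lines
--     if len(error_lines) > max_lines:
--         error_lines = error_lines[-max_lines:]
--
--     # Join the selected lines with newlines and return as a string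
--     return '\n'.join(error_lines)
-- ===== SOURCE B (Python) =====
-- def extract_error_lines(text, max_lines=10):
--     all_lines = text.splitlines()
--     if len(all_lines) <= max_lines:
--         return text
--     # Collect at most max_lines matching lines scanning from the end,
--     # stopping as soon as the buffer is full; then restore original order.
--     picked = []
--     for line in reversed(all_lines):
--         if len(picked) >= max_lines:
--             break
--         if "error" in line.lower():
--             picked.append(line)
--     picked.reverse()
--     return '\n'.join(picked)
-- ===== Notes on version B (the rewrite author's own statement) =====
-- stated objective: alternative
-- what changed: Replaces filter-all-lines-then-tail-slice with a single reverse scan that collects matching lines into a bounded buffer and stops once max_lines are found, then reverses the buffer back.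
-- intended difference: For max_lines <= 0 with more than -max_lines matching lines, A returns the newline-join of error_lines[-max_lines:] (slicing from index zero keeps every matching line, and a negative max_lines drops leading ones), while B returns the empty string — the intended value since at most max_lines <= 0 lines were requested. — e.g. on extract_error_lines("error\nok", 0): A returns "error", B returns ""
import Mathlib
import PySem

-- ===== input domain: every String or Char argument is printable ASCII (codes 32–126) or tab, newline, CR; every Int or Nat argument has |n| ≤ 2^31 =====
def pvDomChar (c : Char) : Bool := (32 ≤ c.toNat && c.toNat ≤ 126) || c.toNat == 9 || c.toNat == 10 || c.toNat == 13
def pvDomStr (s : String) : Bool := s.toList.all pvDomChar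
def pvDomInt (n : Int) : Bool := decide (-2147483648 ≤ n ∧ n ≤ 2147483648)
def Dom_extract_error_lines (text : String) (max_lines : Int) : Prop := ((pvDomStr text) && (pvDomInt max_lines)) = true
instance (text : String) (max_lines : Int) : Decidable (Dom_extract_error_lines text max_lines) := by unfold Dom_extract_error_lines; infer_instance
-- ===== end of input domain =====

-- B replaces filter-then-slice by a bounded reverse scan that stops once max_lines matches
-- are collected (alternative decomposition; for max_lines ≤ 0 it returns the intended empty
-- string where A's tail slice accidentally keeps lines — see D_ below).

-- "error" in line.lower()
def pvIsErr (line : String) : Bool := PySem.Str.isIn "error" (PySem.Str.lower line)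

-- ===== PORT A =====
def extract_error_lines (text : String) (max_lines : Int) : String :=
  let all_lines := PySem.Str.splitlines text
  if (all_lines.length : Int) ≤ max_lines then text
  else
    let error_lines := all_lines.filter pvIsErr
    let error_lines :=
      if (error_lines.length : Int) > max_lines then
        PySem.List.slice error_lines (some (-max_lines)) none
      else error_lines
    PySem.Str.join "\n" error_lines

-- ===== PORT B =====
-- the reversed-iteration loop of Source B, with its 'break' as the first branch
def pvPick (max_lines : Int) (picked : List String) : List String → List String
  | [] => picked
  | line :: rest =>
    if max_lines ≤ (picked.length : Int) then picked
    else if pvIsErr line then pvPick max_lines (picked ++ [line]) rest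
    else pvPick max_lines picked rest

def extract_error_lines_alt (text : String) (max_lines : Int) : String :=
  let all_lines := PySem.Str.splitlines text
  if (all_lines.length : Int) ≤ max_lines then text
  else PySem.Str.join "\n" (pvPick max_lines [] all_lines.reverse).reverse

-- ===== PRECONDITION & SPEC =====
-- For max_lines ≤ 0 with more than -max_lines matching lines A returns the newline-join of
-- error_lines[-max_lines:] (slicing from index zero keeps every matching line, a negative max_lines
-- drops leading ones), while B returns the empty string — the intended value, since at most
-- max_lines ≤ 0 lines were requested.
def D_extract_error_lines (text : String) (max_lines : Int) : Prop :=
  max_lines ≤ 0 ∧ -max_lines < (((PySem.Str.splitlines text).filter pvIsErr).length : Int)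
instance (text : String) (max_lines : Int) : Decidable (D_extract_error_lines text max_lines) := by
  unfold D_extract_error_lines; infer_instance

def Spec_extract_error_lines (text : String) (max_lines : Int) (out : String) : Prop :=
  ¬ D_extract_error_lines text max_lines → out = extract_error_lines_alt text max_lines
instance (text : String) (max_lines : Int) (out : String) : Decidable (Spec_extract_error_lines text max_lines out) := by
  unfold Spec_extract_error_lines; infer_instance

def pvDiffWitness_extract_error_lines : String × Int := ("error\nok", 0)
def pvDiffWitnessOut_extract_error_lines : String × String := ("error", "")

-- ===== CLAIM (what is proved, stated in full; the proofs are below) =====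
def Claim_unchanged_extract_error_lines : Prop := ∀ (text : String) (max_lines : Int), Dom_extract_error_lines text max_lines → Spec_extract_error_lines text max_lines (extract_error_lines text max_lines)
def Claim_changed_extract_error_lines : Prop := Dom_extract_error_lines (pvDiffWitness_extract_error_lines.1) (pvDiffWitness_extract_error_lines.2) ∧ D_extract_error_lines (pvDiffWitness_extract_error_lines.1) (pvDiffWitness_extract_error_lines.2) ∧ extract_error_lines (pvDiffWitness_extract_error_lines.1) (pvDiffWitness_extract_error_lines.2) = pvDiffWitnessOut_extract_error_lines.1 ∧ extract_error_lines_alt (pvDiffWitness_extract_error_lines.1) (pvDiffWitness_extract_error_lines.2) = pvDiffWitnessOut_extract_error_lines.2 ∧ pvDiffWitnessOut_extract_error_lines.1 ≠ pvDiffWitnessOut_extract_error_lines.2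
def Claim_exact_extract_error_lines : Prop := ∀ (text : String) (max_lines : Int), Dom_extract_error_lines text max_lines → D_extract_error_lines text max_lines → extract_error_lines text max_lines ≠ extract_error_lines_alt text max_lines

-- ===== LEMMAS AND PROOFS =====

lemma pvPick_nonpos (m : Int) (hm : m ≤ 0) (acc l) : pvPick m acc l = acc := by
  cases l with
  | nil => rfl
  | cons x t =>
    simp only [pvPick]
    rw [if_pos (by omega)]

lemma pvPick_eq (m : Int) (l acc) :
    pvPick m acc l =
      if m ≤ (acc.length : Int) then acc
      else acc ++ (l.filter pvIsErr).take (m - acc.length).toNat := by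
  induction l generalizing acc with
  | nil => simp [pvPick]
  | cons x t ih =>
    simp only [pvPick]
    by_cases h : m ≤ (acc.length : Int)
    · simp [h]
    · rw [if_neg h, if_neg h]
      by_cases hp : pvIsErr x
      · rw [if_pos hp, ih]
        obtain ⟨k, hk⟩ : ∃ k, (m - acc.length).toNat = k + 1 := ⟨(m - acc.length).toNat - 1, by omega⟩
        by_cases h1 : m ≤ ((acc ++ [x]).length : Int)
        · rw [if_pos h1]
          have : k = 0 := by simp at h1; omega
          simp [hp, hk, this]
        · rw [if_neg h1]
          have hk' : (m - ((acc.length : Int) + 1)).toNat = k := by omega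
          simp [hp, hk, hk', List.take_succ_cons]
      · rw [if_neg (by simp [hp]), ih, if_neg h]
        simp [hp]

lemma revpick (l : List String) (n : Nat) : (l.reverse.take n).reverse = l.drop (l.length - n) := by
  rw [List.take_reverse, List.reverse_reverse]

theorem extract_error_lines_spec : Claim_unchanged_extract_error_lines := by
  intro text m _ hnd
  simp only [extract_error_lines, extract_error_lines_alt]
  by_cases hle : ((PySem.Str.splitlines text).length : Int) ≤ m
  · rw [if_pos hle, if_pos hle]
  · rw [if_neg hle, if_neg hle]
    rcases lt_or_ge 0 m with hm | hm
    · -- m > 0 : B keeps the last m filtered lines, exactly A's tail slice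
      have hB : (pvPick m [] (PySem.Str.splitlines text).reverse).reverse
          = ((PySem.Str.splitlines text).filter pvIsErr).drop
              (((PySem.Str.splitlines text).filter pvIsErr).length - m.toNat) := by
        rw [pvPick_eq, if_neg (show ¬ m ≤ (([] : List String).length : Int) by simp; omega),
          List.nil_append, List.filter_reverse]
        have hn : (m - ((([] : List String).length : Nat) : Int)).toNat = m.toNat := by simp
        rw [hn, revpick]
      rw [hB]
      by_cases hgt : ((((PySem.Str.splitlines text).filter pvIsErr).length : Nat) : Int) > m
      · rw [if_pos hgt, PySem.List.slice_some_none]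
        have h1 : -m = -((m.toNat : Nat) : Int) := by omega
        rw [h1, PySem.List.clampIdx_neg_natCast _ _ (by omega)]
      · rw [if_neg hgt]
        have h0 : ((PySem.Str.splitlines text).filter pvIsErr).length - m.toNat = 0 := by omega
        rw [h0, List.drop_zero]
    · -- m ≤ 0 : outside D_ there are at most -m error lines, both sides join []
      have hcnt : ((((PySem.Str.splitlines text).filter pvIsErr).length : Nat) : Int) ≤ -m := by
        by_contra hc
        exact hnd ⟨hm, by omega⟩
      rw [pvPick_nonpos m hm, List.reverse_nil]
      by_cases hgt : ((((PySem.Str.splitlines text).filter pvIsErr).length : Nat) : Int) > m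
      · rw [if_pos hgt, PySem.List.slice_some_none]
        have h1 : -m = (((-m).toNat : Nat) : Int) := by omega
        rw [h1, PySem.List.clampIdx_natCast]
        have hmin : min (-m).toNat ((PySem.Str.splitlines text).filter pvIsErr).length
            = ((PySem.Str.splitlines text).filter pvIsErr).length := by omega
        rw [hmin, List.drop_length]
      · rw [if_neg hgt]
        have h0 : ((PySem.Str.splitlines text).filter pvIsErr).length = 0 := by omega
        rw [List.eq_nil_of_length_eq_zero h0]

-- ===== VERDICT (by name: the statement is the Claim_ definition above) =====
theorem extract_error_lines_changed : Claim_changed_extract_error_lines := by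
  unfold Claim_changed_extract_error_lines; decide

theorem extract_error_lines_tight : Claim_exact_extract_error_lines := by
  intro text m _ hd
  obtain ⟨hm, hcnt⟩ := hd
  simp only [extract_error_lines, extract_error_lines_alt]
  have hfl : ((PySem.Str.splitlines text).filter pvIsErr).length ≤ (PySem.Str.splitlines text).length :=
    List.length_filter_le _ _
  have hle : ¬ (((PySem.Str.splitlines text).length : Int) ≤ m) := by omega
  rw [if_neg hle, if_neg hle, pvPick_nonpos m hm, List.reverse_nil,
    if_pos (by omega), PySem.List.slice_some_none]
  have h1 : -m = (((-m).toNat : Nat) : Int) := by omega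
  rw [h1, PySem.List.clampIdx_natCast]
  have hmin : min (-m).toNat ((PySem.Str.splitlines text).filter pvIsErr).length = (-m).toNat := by omega
  rw [hmin]
  obtain ⟨h, t, hht⟩ : ∃ h t,
      ((PySem.Str.splitlines text).filter pvIsErr).drop (-m).toNat = h :: t := by
    cases hdrop : ((PySem.Str.splitlines text).filter pvIsErr).drop (-m).toNat with
    | nil =>
      exfalso
      have := congrArg List.length hdrop
      rw [List.length_drop] at this
      simp at this
      omega
    | cons a b => exact ⟨a, b, rfl⟩
  rw [hht]
  have hmem : h ∈ (PySem.Str.splitlines text).filter pvIsErr :=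
    List.mem_of_mem_drop (hht ▸ List.mem_cons_self)
  have hp : pvIsErr h := List.of_mem_filter hmem
  have hne : h.toList ≠ [] := by
    rw [pvIsErr, PySem.Str.isIn_iff_infix] at hp
    have hlen := hp.length_le
    have hlow : (PySem.Str.lower h).toList = h.toList.map PySem.Chars.lowerChar := by
      rw [PySem.Str.toList_lower]; rfl
    rw [hlow, List.length_map] at hlen
    intro hnil
    rw [hnil] at hlen
    simp at hlen
  intro heq
  have htl := congrArg String.toList heq
  rw [PySem.Str.toList_join, PySem.Str.toList_join, List.map_nil, PySem.Chars.join_nil] at htl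
  cases t with
  | nil => rw [List.map_cons, List.map_nil, PySem.Chars.join_singleton] at htl; exact hne htl
  | cons b r =>
    rw [List.map_cons, List.map_cons, PySem.Chars.join_cons_cons] at htl
    simp at htl
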